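-- pv_equiv track=rewrite | github.com/FedeLochbaum/meta-coding-puzzles | Level 2/Tunnel Time.py | getSecondsElapsed
-- ===== SOURCE A (Python) =====
-- from typing import List
--
-- def getSecondsElapsed(C: int, N: int, A: List[int], B: List[int], K: int) -> int:
--   tunnels = sorted([(A[i], B[i]) for i in range(N)])
--
--   sum_tunnels = sum([B[i] - A[i] for i in range(N)])
--   laps, remaining_time = divmod(K, sum_tunnels)
--
--   if remaining_time == 0: return (laps - 1) * C + tunnels[-1][-1]
--
--   for i in range(N):
--     tunnel_length = tunnels[i][1] - tunnels[i][0]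
--     if tunnel_length >= remaining_time:
--       return laps * C + tunnels[i][0] + remaining_time
--
--     remaining_time -= tunnel_length
-- ===== SOURCE B (Python) =====
-- from typing import List
--
-- def getSecondsElapsed(C: int, N: int, A: List[int], B: List[int], K: int) -> int:
--   tunnels = sorted(zip(A[:N], B[:N]))
--
--   # prefix sums of the tunnel lengths; s ends up as the total length
--   pre = []
--   s = 0
--   for a, b in tunnels:
--     s += b - a
--     pre.append(s)
--
--   laps, r = divmod(K, s)
--   if r == 0:
--     return (laps - 1) * C + tunnels[-1][1]
--
--   # the first tunnel whose cumulative length reaches r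
--   i = min(j for j, t in enumerate(pre) if t >= r)
--   return laps * C + tunnels[i][0] + r - (pre[i - 1] if i else 0)
-- ===== Notes on version B (the rewrite author's own statement) =====
-- stated objective: alternative
-- what changed: The destructive scan that mutates remaining_time and returns from inside the loop is replaced by a prefix-sum table of the sorted tunnel lengths built once, a declarative min over the indices whose cumulative length reaches the remaining time, and one closed formula; Pre_ is exactly A's return domain (valid index range, nonzero total, and either an exact multiple of the total or some sorted prefix absorbing the remaining time), since outside it A raises IndexError/ZeroDivisionError or returns None.
-- outside the precondition, e.g. on getSecondsElapsed(-3, 1, [7, 4], [-1, -9763, 52, 9, 0], 2): A returns None, B raises ValueError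
import Mathlib
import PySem

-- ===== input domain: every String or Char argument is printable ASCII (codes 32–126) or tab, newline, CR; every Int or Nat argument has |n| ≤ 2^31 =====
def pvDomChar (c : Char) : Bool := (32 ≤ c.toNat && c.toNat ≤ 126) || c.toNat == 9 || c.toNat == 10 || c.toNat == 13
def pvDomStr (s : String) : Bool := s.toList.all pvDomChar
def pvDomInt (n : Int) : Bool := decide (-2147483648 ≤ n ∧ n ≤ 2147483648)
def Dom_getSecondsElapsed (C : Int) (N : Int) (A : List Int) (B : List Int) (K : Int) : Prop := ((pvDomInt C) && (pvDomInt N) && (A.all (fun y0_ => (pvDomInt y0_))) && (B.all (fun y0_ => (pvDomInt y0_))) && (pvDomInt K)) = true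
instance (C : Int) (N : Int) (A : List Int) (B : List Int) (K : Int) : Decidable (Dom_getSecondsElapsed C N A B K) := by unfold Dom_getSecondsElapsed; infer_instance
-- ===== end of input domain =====

-- B replaces A's destructive scan (mutating remaining_time, returning from inside the loop)
-- by a prefix-sum table of the sorted tunnel lengths, a min over the indices whose
-- cumulative length reaches the remaining time, and one closed formula.

-- ===== PORT A =====
-- the 'for i in range(N): …' loop of A (fallthrough returns Python None; unreachable under Pre_, ported as 0)
def pvLoopA : List (Int × Int) → Int → Int → Int → Int
  | [], _, _, _ => 0
  | (a, b) :: rest, laps, C, r =>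
      if b - a ≥ r then laps * C + a + r
      else pvLoopA rest laps C (r - (b - a))

def getSecondsElapsed (C : Int) (N : Int) (A : List Int) (B : List Int) (K : Int) : Int :=
  let tunnels := PySem.List.sorted2 ((PySem.List.pyRange 0 N 1).map
      (fun i => (PySem.List.pyGetD A i 0, PySem.List.pyGetD B i 0))) (fun p => p.1) (fun p => p.2)
  let sum_tunnels := ((PySem.List.pyRange 0 N 1).map
      (fun i => PySem.List.pyGetD B i 0 - PySem.List.pyGetD A i 0)).sum
  let laps := PySem.Int.floordiv K sum_tunnels
  let remaining_time := PySem.Int.mod K sum_tunnels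
  if remaining_time = 0 then (laps - 1) * C + (PySem.List.pyGetD tunnels (-1) (0, 0)).2
  else pvLoopA tunnels laps C remaining_time

-- ===== PORT B =====
-- the 'for a, b in tunnels: …' loop of B (appends the running sum to pre; returns (s, pre))
def pvScanB : List (Int × Int) → Int → List Int → Int × List Int
  | [], s, pre => (s, pre)
  | (a, b) :: rest, s, pre => pvScanB rest (s + (b - a)) (pre ++ [s + (b - a)])

def getSecondsElapsed_alt (C : Int) (N : Int) (A : List Int) (B : List Int) (K : Int) : Int :=
  let tunnels := PySem.List.sorted2
      (List.zip (PySem.List.slice A none (some N)) (PySem.List.slice B none (some N)))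
      (fun p => p.1) (fun p => p.2)
  let sp := pvScanB tunnels 0 []
  let laps := PySem.Int.floordiv K sp.1
  let r := PySem.Int.mod K sp.1
  if r = 0 then (laps - 1) * C + (PySem.List.pyGetD tunnels (-1) (0, 0)).2
  else
    -- min(j for j, t in enumerate(pre) if t >= r); min of the empty set raises ValueError
    -- (the none case below), which Pre_ excludes — ported as 0 there
    (PySem.List.min?
        (((PySem.List.enumerate sp.2).filter (fun p => decide (r ≤ p.2))).map (fun p => p.1))
        (fun x => x)).elim 0 (fun i =>
      laps * C + (PySem.List.pyGetD tunnels i (0, 0)).1 + r -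
        (if i = 0 then 0 else PySem.List.pyGetD sp.2 (i - 1) 0))

-- ===== PRECONDITION & SPEC =====
-- shape quantities of the input used by Pre_ (not a run of either port):
-- total length of the first N tunnels, and the sorted tunnel list itself
def pvTunnelTotal (N : Int) (A : List Int) (B : List Int) : Int :=
  ((List.zip (A.take N.toNat) (B.take N.toNat)).map (fun p => p.2 - p.1)).sum

def pvSortedTunnels (N : Int) (A : List Int) (B : List Int) : List (Int × Int) :=
  PySem.List.sorted2 (List.zip (A.take N.toNat) (B.take N.toNat))
    (fun p => p.1) (fun p => p.2)

-- Pre_ is exactly A's return domain: a valid index range and a nonzero total length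
-- (else A raises IndexError / ZeroDivisionError), and either K an exact multiple of the
-- total or some prefix of the sorted tunnel list long enough to absorb the remaining
-- time (else A falls off its loop and returns None, not an int).
def Pre_getSecondsElapsed (C : Int) (N : Int) (A : List Int) (B : List Int) (K : Int) : Prop :=
  0 ≤ N ∧ N ≤ A.length ∧ N ≤ B.length ∧ pvTunnelTotal N A B ≠ 0 ∧
    (PySem.Int.mod K (pvTunnelTotal N A B) = 0 ∨
      ∃ k < (pvSortedTunnels N A B).length, PySem.Int.mod K (pvTunnelTotal N A B) ≤
        (((pvSortedTunnels N A B).take (k + 1)).map (fun p => p.2 - p.1)).sum)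
instance (C : Int) (N : Int) (A : List Int) (B : List Int) (K : Int) : Decidable (Pre_getSecondsElapsed C N A B K) := by unfold Pre_getSecondsElapsed; infer_instance

def pvWitness_getSecondsElapsed : Int × Int × List Int × List Int × Int := (10, 2, [4, 0], [5, 3], 4)

def Spec_getSecondsElapsed (C : Int) (N : Int) (A : List Int) (B : List Int) (K : Int) (out : Int) : Prop := out = getSecondsElapsed_alt C N A B K
instance (C : Int) (N : Int) (A : List Int) (B : List Int) (K : Int) (out : Int) : Decidable (Spec_getSecondsElapsed C N A B K out) := by unfold Spec_getSecondsElapsed; infer_instance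

-- ===== CLAIM (what is proved, stated in full; the proofs are below) =====
def Claim_equal_getSecondsElapsed : Prop := ∀ (C : Int) (N : Int) (A : List Int) (B : List Int) (K : Int), Dom_getSecondsElapsed C N A B K → Pre_getSecondsElapsed C N A B K → Spec_getSecondsElapsed C N A B K (getSecondsElapsed C N A B K)

-- ===== LEMMAS AND PROOFS =====

-- prefix sums of the tunnel lengths starting from s (proof helper)
def pvPre : List (Int × Int) → Int → List Int
  | [], _ => []
  | (a, b) :: t, s => (s + (b - a)) :: pvPre t (s + (b - a))

theorem pvScanB_eq (l : List (Int × Int)) : ∀ (s : Int) (pre : List Int),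
    pvScanB l s pre = (s + (l.map (fun p => p.2 - p.1)).sum, pre ++ pvPre l s) := by
  induction l with
  | nil => intro s pre; simp [pvScanB, pvPre]
  | cons hd t ih =>
      intro s pre
      obtain ⟨a, b⟩ := hd
      simp [pvScanB, pvPre, ih]
      ring

theorem pvPre_length (l : List (Int × Int)) : ∀ s, (pvPre l s).length = l.length := by
  induction l with
  | nil => intro s; rfl
  | cons hd t ih => obtain ⟨a, b⟩ := hd; intro s; simp [pvPre, ih]

theorem pvPre_shift (l : List (Int × Int)) : ∀ s, pvPre l s = (pvPre l 0).map (s + ·) := by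
  induction l with
  | nil => intro s; rfl
  | cons hd t ih =>
      obtain ⟨a, b⟩ := hd
      intro s
      simp only [pvPre, List.map_cons, zero_add]
      rw [ih (s + (b - a)), ih (b - a), List.map_map]
      congr 1
      refine List.map_congr_left fun x _ => ?_
      simp only [Function.comp_apply]
      ring

-- "i is the first index whose prefix sum reaches r"
def pvGood (xs : List Int) (r : Int) (i : Nat) : Prop :=
  i < xs.length ∧ r ≤ xs.getD i 0 ∧ ∀ j < i, xs.getD j 0 < r

-- shifting the start of the prefix sums shifts every entry
theorem pvPre_getD_shift (l : List (Int × Int)) (s : Int) (j : Nat) (hj : j < l.length) :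
    (pvPre l s).getD j 0 = s + (pvPre l 0).getD j 0 := by
  rw [pvPre_shift l s]
  rw [List.getD_eq_getElem _ _ (by simpa [pvPre_length] using hj),
      List.getD_eq_getElem _ _ (by simpa [pvPre_length] using hj),
      List.getElem_map]

-- the k-th prefix sum is the total length of the first k+1 tunnels
theorem pvPre_getD_eq_sum_take (l : List (Int × Int)) : ∀ k, k < l.length →
    (pvPre l 0).getD k 0 = ((l.take (k + 1)).map (fun p => p.2 - p.1)).sum := by
  induction l with
  | nil => intro k h; simp at h
  | cons hd t ih =>
      obtain ⟨a, b⟩ := hd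
      intro k hk
      cases k with
      | zero => simp [pvPre]
      | succ kk =>
          have hkk : kk < t.length := by simpa using hk
          simp only [pvPre, zero_add, List.getD_cons_succ, List.take_succ_cons,
            List.map_cons, List.sum_cons]
          rw [pvPre_getD_shift t (b - a) kk hkk, ih kk hkk]

-- A's loop returns the formula at the first index whose prefix sum reaches r
theorem pvLoopA_eq (l : List (Int × Int)) : ∀ (laps C r : Int) (i : Nat),
    pvGood (pvPre l 0) r i →
    pvLoopA l laps C r = laps * C + (l.getD i (0, 0)).1 + r -
      (if i = 0 then 0 else (pvPre l 0).getD (i - 1) 0) := by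
  induction l with
  | nil => intro laps C r i h; exact absurd h.1 (by simp [pvPre])
  | cons hd t ih =>
      obtain ⟨a, b⟩ := hd
      intro laps C r i h
      simp only [pvPre, zero_add] at h ⊢
      obtain ⟨h1, h2, h3⟩ := h
      by_cases hge : b - a ≥ r
      · have hi0 : i = 0 := by
          by_contra h0
          have := h3 0 (by omega)
          simp only [List.getD_cons_zero] at this
          omega
        subst hi0
        simp only [pvLoopA, if_pos hge, List.getD_cons_zero]
        norm_num
      · have hi0 : i ≠ 0 := by
          intro h0
          subst h0
          simp only [List.getD_cons_zero] at h2
          omega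
        obtain ⟨ii, rfl⟩ : ∃ ii, i = ii + 1 := ⟨i - 1, by omega⟩
        have hii : ii < t.length := by
          simpa [pvPre_length] using h1
        have hgood : pvGood (pvPre t 0) (r - (b - a)) ii := by
          refine ⟨by simpa [pvPre_length] using hii, ?_, ?_⟩
          · have := h2
            simp only [List.getD_cons_succ] at this
            rw [pvPre_getD_shift t (b - a) ii hii] at this
            omega
          · intro j hj
            have := h3 (j + 1) (by omega)
            simp only [List.getD_cons_succ] at this
            rw [pvPre_getD_shift t (b - a) j (by omega)] at this
            omega
        have hres := ih laps C (r - (b - a)) ii hgood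
        simp only [pvLoopA, if_neg hge]
        rw [hres]
        simp only [List.getD_cons_succ, Nat.succ_sub_one]
        cases ii with
        | zero =>
            simp only [List.getD_cons_zero]
            norm_num
            ring
        | succ kk =>
            rw [if_neg (by omega : ¬ kk + 1 = 0), if_neg (by omega : ¬ kk + 1 + 1 = 0)]
            simp only [List.getD_cons_succ, Nat.add_sub_cancel]
            rw [pvPre_getD_shift t (b - a) kk (by omega)]
            ring

-- membership in B's candidate list of indices
theorem pv_mem_cand (pre : List Int) (r : Int) (x : Int) :
    x ∈ ((PySem.List.enumerate pre).filter (fun p => decide (r ≤ p.2))).map (fun p => p.1) ↔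
    ∃ k : Nat, k < pre.length ∧ x = (k : Int) ∧ r ≤ pre.getD k 0 := by
  constructor
  · intro hx
    obtain ⟨p, hp, rfl⟩ := List.mem_map.mp hx
    obtain ⟨hpe, hpr⟩ := List.mem_filter.mp hp
    obtain ⟨k, hk, rfl⟩ := (PySem.List.mem_enumerate_iff _ _ _).mp hpe
    refine ⟨k, hk, by simp, ?_⟩
    rw [List.getD_eq_getElem _ _ hk]
    simpa using hpr
  · rintro ⟨k, hk, rfl, hr⟩
    refine List.mem_map.mpr ⟨((k : Int), pre[k]), ?_, by simp⟩
    refine List.mem_filter.mpr ⟨?_, ?_⟩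
    · exact (PySem.List.mem_enumerate_iff _ _ _).mpr ⟨k, hk, by simp⟩
    · rw [List.getD_eq_getElem _ _ hk] at hr
      simpa using hr
  -- note: PySem.List.enumerate pre with default start 0 gives first components (0 + k)

-- the min over the candidate indices is the first index whose prefix sum reaches r
theorem pv_min_cand (pre : List Int) (r : Int) (i : Nat) (hgood : pvGood pre r i) :
    PySem.List.min?
      (((PySem.List.enumerate pre).filter (fun p => decide (r ≤ p.2))).map (fun p => p.1))
      (fun x => x) = some ((i : Nat) : Int) := by
  set cand := ((PySem.List.enumerate pre).filter (fun p => decide (r ≤ p.2))).map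
      (fun p => p.1) with hcand
  have hmem : ((i : Nat) : Int) ∈ cand := by
    rw [hcand, pv_mem_cand]
    exact ⟨i, hgood.1, rfl, hgood.2.1⟩
  have hne : cand ≠ [] := fun h => by rw [h] at hmem; simp at hmem
  obtain ⟨m, hm⟩ : ∃ m, PySem.List.min? cand (fun x => x) = some m := by
    cases hmin : PySem.List.min? cand (fun x => x) with
    | none => exact absurd ((PySem.List.min?_eq_none_iff _ _).mp hmin) hne
    | some m => exact ⟨m, rfl⟩
  have hmmem : m ∈ cand := PySem.List.min?_mem hm
  have hmle : m ≤ ((i : Nat) : Int) := PySem.List.min?_isMin hm _ hmem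
  obtain ⟨k, hk, rfl, hkr⟩ := (pv_mem_cand pre r m).mp (hcand ▸ hmmem)
  have hik : i ≤ k := by
    by_contra hc
    exact absurd hkr (not_le.mpr (hgood.2.2 k (by omega)))
  have : k = i := by omega
  rw [hm, this]

-- the two ports build the same (unsorted) tunnel list
theorem pv_build_eq (N : Int) (A B : List Int) (h0 : 0 ≤ N) (hA : N ≤ A.length) (hB : N ≤ B.length) :
    (PySem.List.pyRange 0 N 1).map (fun i => (PySem.List.pyGetD A i 0, PySem.List.pyGetD B i 0)) =
    List.zip (PySem.List.slice A none (some N)) (PySem.List.slice B none (some N)) := by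
  obtain ⟨n, rfl⟩ : ∃ n : Nat, N = (n : Int) := ⟨N.toNat, (Int.toNat_of_nonneg h0).symm⟩
  have hA' : n ≤ A.length := by exact_mod_cast hA
  have hB' : n ≤ B.length := by exact_mod_cast hB
  rw [PySem.List.slice_to_natCast, PySem.List.slice_to_natCast, PySem.List.pyRange_zero_natCast]
  apply List.ext_getElem
  · simp [hA', hB']
  · intro i h1 h2
    simp only [List.getElem_map, List.getElem_range, List.getElem_zip, List.getElem_take,
      PySem.List.pyGetD_natCast]
    have hi : i < n := by simpa using h1
    rw [List.getD_eq_getElem _ _ (by omega), List.getD_eq_getElem _ _ (by omega)]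

-- ===== VERDICT (by name: the statement is the Claim_ definition above) =====
theorem getSecondsElapsed_spec : Claim_equal_getSecondsElapsed := by
  intro C N A B K _hdom hpre
  obtain ⟨h0, hA, hB, hne0, hcross⟩ := hpre
  unfold Spec_getSecondsElapsed
  simp only [getSecondsElapsed, getSecondsElapsed_alt]
  rw [← pv_build_eq N A B h0 hA hB]
  set raw := (PySem.List.pyRange 0 N 1).map
      (fun i => (PySem.List.pyGetD A i 0, PySem.List.pyGetD B i 0)) with hraw
  set tun := PySem.List.sorted2 raw (fun p => p.1) (fun p => p.2) with htun
  -- the sums computed by the two ports coincide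
  have hsumA : ((PySem.List.pyRange 0 N 1).map
      (fun i => PySem.List.pyGetD B i 0 - PySem.List.pyGetD A i 0)).sum =
      (raw.map (fun p => p.2 - p.1)).sum := by
    rw [hraw, List.map_map]
    rfl
  have hperm : tun.Perm raw := PySem.List.sorted2_perm raw (fun p => p.1) (fun p => p.2) false
  have hsumB : (tun.map (fun p => p.2 - p.1)).sum = (raw.map (fun p => p.2 - p.1)).sum :=
    (hperm.map _).sum_eq
  have hzip : raw = List.zip (A.take N.toNat) (B.take N.toNat) := by
    obtain ⟨n, rfl⟩ : ∃ n : Nat, N = (n : Int) := ⟨N.toNat, (Int.toNat_of_nonneg h0).symm⟩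
    rw [hraw, pv_build_eq _ A B h0 hA hB,
        PySem.List.slice_to_natCast, PySem.List.slice_to_natCast]
    simp
  have htot : pvTunnelTotal N A B = (raw.map (fun p => p.2 - p.1)).sum := by
    unfold pvTunnelTotal
    rw [hzip]
  rw [hsumA, pvScanB_eq]
  simp only [zero_add, List.nil_append]
  set tot := (raw.map (fun p => p.2 - p.1)).sum with htotdef
  rw [hsumB]
  by_cases hr : PySem.Int.mod K tot = 0
  · rw [if_pos hr, if_pos hr]
  · rw [if_neg hr, if_neg hr]
    set r := PySem.Int.mod K tot with hrdef
    set pre := pvPre tun 0 with hpre'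
    have hplen : pre.length = tun.length := pvPre_length tun 0
    -- Pre_'s crossing disjunct gives an index whose prefix sum reaches r
    have hst : pvSortedTunnels N A B = tun := by
      unfold pvSortedTunnels
      rw [← hzip, ← htun]
    have hex : ∃ j, j < pre.length ∧ r ≤ pre.getD j 0 := by
      rcases hcross with hm | ⟨k, hk, hle⟩
      · exfalso; apply hr; rw [hrdef, ← htot]; exact hm
      · rw [hst] at hk hle
        rw [htot] at hle
        refine ⟨k, by rw [hplen]; exact hk, ?_⟩
        rw [hpre', pvPre_getD_eq_sum_take tun k hk]
        exact hle
    -- the first such index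
    classical
    let i := Nat.find hex
    have hifind := Nat.find_spec hex
    have himin : ∀ j, j < i → ¬(j < pre.length ∧ r ≤ pre.getD j 0) :=
      fun j hj => Nat.find_min hex hj
    have hgoodp : pvGood pre r i := by
      refine ⟨hifind.1, hifind.2, ?_⟩
      intro j hj
      have hjlen : j < pre.length := lt_trans hj hifind.1
      rcases not_and_or.mp (himin j hj) with h' | h'
      · exact absurd hjlen h'
      · exact not_le.mp h'
    -- A's side
    have hAside := pvLoopA_eq tun (PySem.Int.floordiv K tot) C r i
      (by rw [← hpre']; exact hgoodp)
    -- B's side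
    have hBmin := pv_min_cand pre r i hgoodp
    rw [hAside, hBmin, Option.elim_some]
    have hget : PySem.List.pyGetD tun ((i : Nat) : Int) (0, 0) = tun.getD i (0, 0) := by
      simp [PySem.List.pyGetD_natCast]
    rw [hget, ← hpre']
    by_cases hi0 : i = 0
    · have hi0' : ((i : Int) = 0) := by exact_mod_cast hi0
      rw [if_pos hi0, if_pos hi0']
    · have hi0' : ¬ ((i : Int) = 0) := by exact_mod_cast hi0
      rw [if_neg hi0, if_neg hi0']
      have hcast : ((i : Int) - 1) = ((i - 1 : Nat) : Int) := by omega
      rw [hcast, PySem.List.pyGetD_natCast]
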